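-- pv_equiv track=rewrite | github.com/RohitSingh107/practice-code | python/problems/lc1462.py | check
-- ===== SOURCE A (Python) =====
-- from typing import List, Deque
--
-- def check(x : int,y :int, courses : List[int]) -> bool:
--
--     xFlag = False
--     yFlag = False
--
--     for i in courses:
--         if i == y and not xFlag:
--             yFlag = True
--         if i == x:
--             xFlag = True
--
--
--     return xFlag and yFlag
-- ===== SOURCE B (Python) =====
-- def check(x: int, y: int, courses: list) -> bool:
--     # Walk to the FIRST element equal to x or y and decide there, consuming the
--     # iterator: if y comes first (or x == y there), the answer reduces to
--     # "is x among the not-yet-consumed elements"; if x comes first, y was not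
--     # seen in time; if neither occurs, x is absent.  Stops early.
--     it = iter(courses)
--     for c in it:
--         if c == y:
--             return c == x or x in it
--         if c == x:
--             return False
--     return False
-- ===== Notes on version B (the rewrite author's own statement) =====
-- stated objective: alternative
-- what changed: Instead of A's exhaustive flag-carrying loop over the whole list, B scans only up to the first occurrence of x or y and decides right there (early exit), reducing the y-first case to a membership test on the iterator's unconsumed tail.
import Mathlib
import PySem

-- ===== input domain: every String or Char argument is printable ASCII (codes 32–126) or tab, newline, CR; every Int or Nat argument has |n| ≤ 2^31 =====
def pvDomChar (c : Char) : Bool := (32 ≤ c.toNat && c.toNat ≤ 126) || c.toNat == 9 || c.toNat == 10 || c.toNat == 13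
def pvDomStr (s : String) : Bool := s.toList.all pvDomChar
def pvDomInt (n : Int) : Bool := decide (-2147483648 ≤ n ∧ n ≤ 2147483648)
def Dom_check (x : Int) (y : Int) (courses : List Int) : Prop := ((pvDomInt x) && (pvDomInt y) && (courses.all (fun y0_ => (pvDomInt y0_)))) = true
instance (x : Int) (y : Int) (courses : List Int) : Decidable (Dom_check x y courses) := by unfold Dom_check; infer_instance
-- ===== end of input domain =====

-- B decides at the first occurrence of x or y (early exit, membership in the unconsumed tail) instead of A's exhaustive flag-carrying loop; alternative decomposition, same worst-case cost.


-- ===== PORT A =====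
-- the for-loop carrying (xFlag, yFlag), updated in the same branch order as A
def check (x : Int) (y : Int) (courses : List Int) : Bool :=
  let st := courses.foldl (fun (st : Bool × Bool) i =>
    let yFlag := if i == y && !st.1 then true else st.2
    let xFlag := if i == x then true else st.1
    (xFlag, yFlag)) (false, false)
  st.1 && st.2

-- ===== PORT B =====
-- B's loop over the iterator: the recursion consumes the list head by head; at the
-- first element equal to y it returns `c == x or x in it` (membership in the
-- unconsumed tail), at the first element equal to x it returns false.
def check_alt (x : Int) (y : Int) (courses : List Int) : Bool :=
  match courses with
  | [] => false
  | c :: it =>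
    if c == y then c == x || it.contains x
    else if c == x then false
    else check_alt x y it

-- ===== PRECONDITION & SPEC =====
def Spec_check (x : Int) (y : Int) (courses : List Int) (out : Bool) : Prop := out = check_alt x y courses
instance (x : Int) (y : Int) (courses : List Int) (out : Bool) : Decidable (Spec_check x y courses out) := by unfold Spec_check; infer_instance

-- ===== CLAIM (what is proved, stated in full; the proofs are below) =====
def Claim_equal_check : Prop := ∀ (x : Int) (y : Int) (courses : List Int), Dom_check x y courses → Spec_check x y courses (check x y courses)

-- ===== LEMMAS AND PROOFS =====

-- y seen strictly before, or at, the first occurrence of x (scanning left to right)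
def pvAux (x : Int) (y : Int) : List Int → Bool
  | [] => false
  | c :: t => if c == y then true else if c == x then false else pvAux x y t

-- characterisation of A's fold from an arbitrary flag state
theorem pvLoop_char (x y : Int) (cs : List Int) : ∀ (xF yF : Bool),
    cs.foldl (fun (st : Bool × Bool) i =>
      let yFlag := if i == y && !st.1 then true else st.2
      let xFlag := if i == x then true else st.1
      (xFlag, yFlag)) (xF, yF)
    = (xF || cs.contains x, yF || (!xF && pvAux x y cs)) := by
  induction cs with
  | nil => intro xF yF; simp [pvAux]
  | cons c t ih =>
    intro xF yF
    simp only [List.foldl_cons, ih, List.contains_cons, pvAux, Prod.mk.injEq]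
    refine ⟨?_, ?_⟩
    · cases xF <;> by_cases hcx : c = x <;> simp [hcx, @eq_comm _ x c]
    · cases xF <;> cases yF <;> by_cases hcy : c = y <;> by_cases hcx : c = x <;>
        simp [hcx, hcy]

-- B's early-exit recursion equals "x present AND y not later than first x"
theorem pvAlt_char (x y : Int) : ∀ (cs : List Int),
    check_alt x y cs = (cs.contains x && pvAux x y cs) := by
  intro cs
  induction cs with
  | nil => simp [check_alt, pvAux]
  | cons c t ih =>
    by_cases hcy : c = y
    · subst hcy; by_cases hxy : x = c
      · simp [check_alt, pvAux, hxy]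
      · have h3 : (c == x) = false := by
          simp only [beq_eq_false_iff_ne, ne_eq]
          exact fun h => absurd h.symm hxy
        simp [check_alt, pvAux, h3, hxy]
    · by_cases hcx : c = x
      · simp [check_alt, pvAux, hcx]
      · simp [check_alt, pvAux, hcy, hcx, ih, @eq_comm _ x c]

-- ===== VERDICT (by name: the statement is the Claim_ definition above) =====
theorem check_spec : Claim_equal_check := by
  intro x y courses _
  unfold Spec_check check
  rw [pvLoop_char, pvAlt_char]
  simp
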